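/- GENERATED by mk_final_copies.py from the proof of the farm's unit `start_decoder.C8f` (farm:start_decoder.C8f.1: Lemmas.lean) as the
   re-elaboration sweep compiled it — do not edit. -/
import Asan.CheckWalk
import Vorbis.Spec.StartDecoderC4
import Vorbis.Spec.StartDecoderC3
import Vorbis.Spec.Units.start_decoder_C8f

open X86 X86.User Asan Vorbis Vorbis.Spec Vorbis.Spec.StartDecoder

set_option maxRecDepth 100000
set_option maxHeartbeats 4000000

namespace Vorbis.Spec.start_decoder_C8f

/-! ### 1. The assertions at the two inner cut points (`cut145`, `cut146`) -/

/-- **What all three stages of C8f carry of the book under construction**: `In8F` without its temp blocks and registers, at the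
program counter `pc` (cut144, cut145, cut146): `Frame`, CUR(i), K1, K2, K4, K4c, `Fresh3`, `sparse = 1`, the final
`codeword_lengths` block. -/
structure C8fCore (u₀ : State) (g : Ghost) (i : Nat) (A2 A3 Ai : Arena) (A : Arena × List Obj) (pc : Word) (v : State) :
    Prop where
  /-- the common part at the cut -/
  frame : Frame u₀ g pc A v
  cur : Cur g i A2 A3 Ai A v
  k1 : Codebook.K1 v.mem (g.cb v.mem i)
  k2 : Codebook.K2 v.mem (g.cb v.mem i)
  k4 : Codebook.K4 (Since Ai A.1) v.mem (g.cb v.mem i)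
  k4c : Codebook.K4c v.mem (g.cb v.mem i)
  fresh : Fresh3 v.mem (g.cb v.mem i)
  sparse1 : Codebook.sparse v.mem (g.cb v.mem i) = 1
  cl : Since Ai A.1 ⟨Codebook.codeword_lengths v.mem (g.cb v.mem i), (Codebook.sorted_entries v.mem (g.cb v.mem i)).toNat⟩

/-- **cut145 = 0x114b52** (`lea rdi, [r14+4]`: `setup_temp_free(f, c->codewords, 4·SE)` returned; line 3867): the core, the one
temp block left P1 = (lengths, E), r15 = f, rbx = lengths, r12 = &c->codewords. -/
structure C8fAt145 (u₀ : State) (g : Ghost) (i : Nat) (A2 A3 Ai : Arena) (A : Arena × List Obj) (lengths : Nat) (v : State) :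
    Prop where
  core : C8fCore u₀ g i A2 A3 Ai A L.start_decoder.cut145 v
  temps : TempsAre A.1 [(lengths, (Codebook.entries v.mem (g.cb v.mem i)).toNat)]
  r15 : v.reg .r15 = addr g.f
  rbx : v.reg .rbx = addr lengths
  r12 : v.reg .r12 = addr (g.cb v.mem i) + 40

/-- **cut146 = 0x114b6a** (`mov rdi, r12`: `setup_temp_free(f, lengths, E)` returned; line 3868): the core, no temp block left,
r12 = &c->codewords. -/
structure C8fAt146 (u₀ : State) (g : Ghost) (i : Nat) (A2 A3 Ai : Arena) (A : Arena × List Obj) (v : State) : Prop where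
  core : C8fCore u₀ g i A2 A3 Ai A L.start_decoder.cut146 v
  noTemps : A.1.temps = []
  r12 : v.reg .r12 = addr (g.cb v.mem i) + 40

/-- The core at the entry of the unit. -/
theorem c8f_core_of_in8F {u₀ : State} {g : Ghost} {i : Nat} {A2 A3 Ai : Arena} {A : Arena × List Obj} {lengths : Nat}
    {v : State} (h : In8F u₀ g i A2 A3 Ai A lengths v) : C8fCore u₀ g i A2 A3 Ai A L.start_decoder.cut144 v :=
  { frame := h.frame
    cur := h.cur
    k1 := h.k1
    k2 := h.k2
    k4 := h.k4
    k4c := h.k4c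
    fresh := h.fresh
    sparse1 := h.sparse1
    cl := h.cl }

/-! ### 2. Pure lemmas -/

/-- **Where `*f` is** (as `c5c_obj_where` of the worked unit C5c): in the data space, and off the part of the stack below the
steady stack pointer `R`. -/
theorem c8f_obj_where {g : Ghost} {i : Nat} {A2 A3 Ai : Arena} {A : Arena × List Obj} {v : State} (h : Cur g i A2 A3 Ai A v)
    (hsh : ShadowInv A.2 g.frames' g.R v.mem) (hoff : ∀ o, o ∈ A.2 → L.textHi ≤ o.base) :
    0x119d40 ≤ g.f ∧ g.f + 1808 ≤ 0xC00000 ∧ (g.R ≤ g.f ∨ g.f + 1808 ≤ 0x700000 ∨ 0x800000 ≤ g.f) := by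
  have hl : LiveIn A.2 g.frames' g.f Off.sizeof.stb_vorbis := by
    apply h.hand.obj.mono
    intro o ho
    unfold Ghost.frames'
    rw [stackObjs_cons]
    rcases List.mem_append.mp ho with hs | ho'
    · exact List.mem_append_left _ (List.mem_append_right _ hs)
    · exact List.mem_append_right _ ho'
  have hw := hl.where_ hsh hoff (by simp only [voff]; omega)
  simp only [voff] at hw
  exact hw

/-- `lea edx, [rbp*4]` with `ebp = n < 2^24`: no 32-bit wrap. -/
theorem c8f_lea4 (n : Nat) (hn : n < 2 ^ 24) :
    (Word.ofBV (BitVec.setWidth 32 (Word.ofBV (BitVec.ofNat 32 n) * 4).toBitVec)).toNat = 4 * n := by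
  have e4 : (4 : Word).toNat = 4 := rfl
  rw [Vorbis.toNat_ofBV32, BitVec.toNat_setWidth, UInt64.toNat_toBitVec, UInt64.toNat_mul, Vorbis.toNat_ofBV32,
    BitVec.toNat_ofNat, e4]
  omega

/-- A non-negative C `int` field, as the 32-bit word the code loads. -/
theorem c8f_i32_word (m : Mem) (a : Nat) (hnn : 0 ≤ sint32 (m.readLE (addr a) 4)) :
    m.readLE (addr a) 4 = (sint32 (m.readLE (addr a) 4)).toNat := by
  have hc := sint32_cases (m.readLE (addr a) 4)
  rcases hc with ⟨_, h2⟩ | ⟨_, h2⟩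
  · rw [h2]
    exact (Int.toNat_natCast _).symm
  · have hlt' : m.readLE (addr a) 4 < 256 ^ 4 := Mem.readLE_lt' m _ 4
    rw [h2] at hnn
    omega

/-- **The first of the outstanding temp blocks is the top one**: `p = B + T` (`ArenaOK.top_eq_T`), and the ghost's list in the
form `setup_temp_free.spec` asks. -/
theorem c8f_top {g : Ghost} {i : Nat} {A2 A3 Ai : Arena} {A : Arena × List Obj} {v : State} {p n : Nat}
    {blocks : List (Nat × Nat)} (hcur : Cur g i A2 A3 Ai A v) (htemps : TempsAre A.1 ((p, n) :: blocks)) :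
    A.1.temps = (A.1.T, n) :: blocks.map (fun b => (b.1 - A.1.B, b.2)) ∧ p = A.1.B + A.1.T := by
  have ht1 : A.1.temps = (p - A.1.B, n) :: blocks.map (fun b => (b.1 - A.1.B, b.2)) := htemps.1
  have ht2 : A.1.B ≤ p := htemps.2 (p, n) List.mem_cons_self
  obtain ⟨htop, _⟩ := hcur.sd.arena.top_eq_T ht1
  refine ⟨?_, by omega⟩
  rw [ht1, htop]

/-- **The LIFO precondition of `setup_temp_free(f, p, n)`** when `(p, n)` is the first of the outstanding temp blocks: the state
`s` at the callee's entry has the memory of the cut point but for the pushed return address below `R`; the first block of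
`TempsAre` is the top one, so `p = B + T` (`ArenaOK.top_eq_T`). -/
theorem c8f_free_pre {u₀ : State} {g : Ghost} {i : Nat} {A2 A3 Ai : Arena} {A : Arena × List Obj} {pc : Word} {v s : State}
    {p n : Nat} {blocks : List (Nat × Nat)} (hfr : Frame u₀ g pc A v) (hcur : Cur g i A2 A3 Ai A v)
    (htemps : TempsAre A.1 ((p, n) :: blocks))
    (hun : ShadowUntouched v.mem s.mem) (hmem : Mem.EqOn (g.f + 112) (g.f + 136) v.mem s.mem)
    (hrsp : (s.reg .rsp).toNat + 8 = g.R) (hrdi : (s.reg .rdi).toNat = g.f) (hrsi : (s.reg .rsi).toNat = p)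
    (hrdx : (s.reg .rdx).toNat % 2 ^ 32 = n) :
    (setup_temp_free.spec A.2 g.frames' A.1 n (blocks.map (fun b => (b.1 - A.1.B, b.2)))).pre s ∧
      A.1.temps = (A.1.T, n) :: blocks.map (fun b => (b.1 - A.1.B, b.2)) ∧ p = A.1.B + A.1.T := by
  have hob := hcur.sd.bits.OB1
  obtain ⟨hf1, hf2, _⟩ := c8f_obj_where hcur hfr.shadow hfr.offText
  obtain ⟨hT, hl⟩ := c8f_top hcur htemps
  refine ⟨⟨⟨⟨?_, hfr.offText⟩, ?_, ?_, hcur.hand.arenaText⟩, Or.inr ⟨hT, ?_, ?_, ?_⟩⟩, hT, hl⟩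
  · rw [hrsp]
    exact hfr.shadow.untouched hun
  · rw [hrdi]
    exact hcur.sd.env.live _ hob
  · rw [hrdi]
    apply hcur.sd.arena.frame (by simp only [voff]; omega)
    simp only [voff]
    exact hmem
  · rw [hrsi, hl]
  · rw [hrdx]
  · rw [hrdi]
    exact setup_temp_free.apart_of_out hcur.sd.arena hT hcur.hand.objOut

/-- **The core over a `call setup_temp_free`** (`Cur.free_call`'s results `hF hC hcb hkept`): the struct `cb(i)` and the tables
of the book are setup blocks, every setup block is kept, the ghost's setup blocks are the same (`hblk`). -/
theorem c8f_core_free {u₀ : State} {g : Ghost} {i : Nat} {A2 A3 Ai : Arena} {A A' : Arena × List Obj} {pc pc' : Word}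
    {v w : State} (h : C8fCore u₀ g i A2 A3 Ai A pc v) (hF : Frame u₀ g pc' A' w) (hC : Cur g i A2 A3 Ai A' w)
    (hcb : g.cb w.mem i = g.cb v.mem i) (hkept : AllKept A.1.Blk v.mem w.mem)
    (hblk : ∀ B, Since Ai A.1 B → Since Ai A'.1 B) :
    C8fCore u₀ g i A2 A3 Ai A' pc' w ∧ Codebook.SameFields v.mem w.mem (g.cb v.mem i) := by
  have hcbOK := h.cur.ages.cbOK
  have hkI : AllKept Ai.Blk v.mem w.mem := fun B hB => hkept B (hB.mono h.cur.ages.exti)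
  have hstruct : (Codebook.block (g.cb v.mem i)).Kept v.mem w.mem := hcbOK.cb_kept (hkI _ hcbOK.F2) i h.cur.lt
  have hsf := Codebook.SameFields.of_kept hstruct
  have hv : 1 ≤ Codebook.sorted_entries v.mem (g.cb v.mem i) →
      (Codebook.svBlock v.mem (g.cb v.mem i)).Kept v.mem w.mem := fun hse => hkept _ (h.k4.sv hse).1
  have k4 : Codebook.K4 (Since Ai A.1) w.mem (g.cb v.mem i) := by
    apply h.k4.frame hsf
    intro hse
    exact (hv hse).i32 _ (Nat.le_refl _) (by simp only []; omega)
  have k4c : Codebook.K4c w.mem (g.cb v.mem i) := by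
    apply h.k4c.frame hsf
    intro x hx
    have hse : 1 ≤ Codebook.sorted_entries v.mem (g.cb v.mem i) := by omega
    simp only [Codebook.sorted_values_at]
    apply (hv hse).i32
    · simp only []
      omega
    · simp only []
      omega
  refine ⟨?_, hsf⟩
  exact
    { frame := hF
      cur := hC
      k1 := by rw [hcb]; exact h.k1.frame hsf
      k2 := by rw [hcb]; exact h.k2.frame hsf
      k4 := by
        rw [hcb]
        exact ⟨fun hse => hblk _ (k4.sc hse), fun hse => hblk _ (k4.sv hse), k4.sentinel, k4.null⟩
      k4c := by rw [hcb]; exact k4c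
      fresh := by
        rw [hcb]
        exact ⟨by rw [hsf.lookup_type]; exact h.fresh.lookup_type, by rw [hsf.lookup_values]; exact h.fresh.lookup_values,
          by rw [hsf.multiplicands]; exact h.fresh.multiplicands⟩
      sparse1 := by rw [hcb, hsf.sparse]; exact h.sparse1
      cl := by rw [hcb, hsf.codeword_lengths, hsf.sorted_entries]; exact hblk _ h.cl }

/-- **The fields of the struct at `c` that K1, K2, K4, K4c, `Fresh3` and K3s's first clause read are the same in two memories that
agree on the struct but for `codewords` (`[c + 40, c + 48)`)**: `BookFields` without its field `codewords`. -/
structure C8fFields (m m' : Mem) (c : Nat) : Prop where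
  dimensions : Codebook.dimensions m' c = Codebook.dimensions m c
  entries : Codebook.entries m' c = Codebook.entries m c
  codeword_lengths : Codebook.codeword_lengths m' c = Codebook.codeword_lengths m c
  lookup_type : Codebook.lookup_type m' c = Codebook.lookup_type m c
  sparse : Codebook.sparse m' c = Codebook.sparse m c
  lookup_values : Codebook.lookup_values m' c = Codebook.lookup_values m c
  multiplicands : Codebook.multiplicands m' c = Codebook.multiplicands m c
  sorted_codewords : Codebook.sorted_codewords m' c = Codebook.sorted_codewords m c
  sorted_values : Codebook.sorted_values m' c = Codebook.sorted_values m c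
  sorted_entries : Codebook.sorted_entries m' c = Codebook.sorted_entries m c

/-- The fields from the two kept parts of the struct around `codewords`. -/
theorem C8fFields.of_eqOn {m m' : Mem} {c : Nat} (hc : c + 2120 ≤ 2 ^ 64) (b1 : Mem.EqOn c (c + 40) m m')
    (b2 : Mem.EqOn (c + 48) (c + 2120) m m') : C8fFields m m' c := by
  constructor
  · simp only [vacc, voff]
    exact b1.i32 _ (by omega) (by omega) (by omega)
  · simp only [vacc, voff]
    exact b1.i32 _ (by omega) (by omega) (by omega)
  · simp only [vacc, voff]
    exact b1.u64 _ (by omega) (by omega) (by omega)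
  · simp only [vacc, voff]
    exact b1.u8 _ (by omega) (by omega) (by omega)
  · simp only [vacc, voff]
    exact b1.u8 _ (by omega) (by omega) (by omega)
  · simp only [vacc, voff]
    exact b1.u32 _ (by omega) (by omega) (by omega)
  · simp only [vacc, voff]
    exact b1.u64 _ (by omega) (by omega) (by omega)
  · simp only [vacc, voff]
    exact b2.u64 _ (by omega) (by omega) (by omega)
  · simp only [vacc, voff]
    exact b2.u64 _ (by omega) (by omega) (by omega)
  · simp only [vacc, voff]
    exact b2.i32 _ (by omega) (by omega) (by omega)

/-- Frame of K1 over the fields it reads. -/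
theorem C8fFields.k1 {m m' : Mem} {c : Nat} (e : C8fFields m m' c) (h : Codebook.K1 m c) : Codebook.K1 m' c := by
  refine ⟨?_, ?_, ?_, ?_⟩
  · rw [e.dimensions]
    exact h.dim_pos
  · rw [e.dimensions]
    exact h.dim_le
  · rw [e.entries]
    exact h.ent_nonneg
  · rw [e.entries]
    exact h.ent_lt

/-- Frame of K2 over the fields it reads. -/
theorem C8fFields.k2 {m m' : Mem} {c : Nat} (e : C8fFields m m' c) (h : Codebook.K2 m c) : Codebook.K2 m' c := by
  refine ⟨?_, ?_, ?_, ?_, ?_⟩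
  · rw [e.sparse]
    exact h.sparse_01
  · rw [e.sorted_entries]
    exact h.se_nonneg
  · rw [e.sorted_entries, e.entries]
    exact h.se_le
  · rw [e.sparse, e.sorted_entries]
    exact h.sparse_pos
  · rw [e.sparse, e.sorted_entries, e.entries]
    exact h.sparse_quarter

/-- Frame of K4 over the fields it reads and the `sorted_values` block (the sentinel word). -/
theorem C8fFields.k4 {Blk : Block → Prop} {m m' : Mem} {c : Nat} (e : C8fFields m m' c) (h : Codebook.K4 Blk m c)
    (hv : 1 ≤ Codebook.sorted_entries m c → (Codebook.svBlock m c).Kept m m') : Codebook.K4 Blk m' c := by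
  refine ⟨?_, ?_, ?_, ?_⟩
  · rw [e.sorted_entries, e.sorted_codewords]
    exact h.sc
  · rw [e.sorted_entries, e.sorted_values]
    exact h.sv
  · rw [e.sorted_entries, e.sorted_values]
    intro hse
    rw [(hv hse).i32 _ (Nat.le_refl _) (by simp only []; omega)]
    exact h.sentinel hse
  · rw [e.sorted_entries, e.sorted_codewords, e.sorted_values]
    exact h.null

/-- Frame of K4c over the fields it reads and the `sorted_values` block. -/
theorem C8fFields.k4c {m m' : Mem} {c : Nat} (e : C8fFields m m' c) (h : Codebook.K4c m c)
    (hv : 1 ≤ Codebook.sorted_entries m c → (Codebook.svBlock m c).Kept m m') : Codebook.K4c m' c := by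
  intro x hx
  rw [e.sorted_entries] at hx
  have hse : 1 ≤ Codebook.sorted_entries m c := by omega
  have e1 : Codebook.sorted_values_at m' c x = Codebook.sorted_values_at m c x := by
    simp only [Codebook.sorted_values_at, e.sorted_values]
  have e2 : m'.i32 (Codebook.sorted_values_at m c x) = m.i32 (Codebook.sorted_values_at m c x) := by
    simp only [Codebook.sorted_values_at]
    apply (hv hse).i32
    · simp only []
      omega
    · simp only []
      omega
  rw [e1, e2, e.entries]
  exact h x hx

/-- **`AtC9` from cut146 over the store `c->codewords = NULL`** (and the pushed return address of its check): `Frame.step`,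
`Cur.step` over the two windows `[R − 8, R)` and `[c + 40, c + 48)`; K1, K2, K4, K4c, `Fresh3` do not read offset 40; K3 of a sparse
book is the `codeword_lengths` block and the stored NULL. -/
theorem c8f_store_exit {u₀ : State} {g : Ghost} {i : Nat} {A2 A3 Ai : Arena} {A : Arena × List Obj} {v w : State}
    (h : C8fAt146 u₀ g i A2 A3 Ai A v)
    (hs : Mem.SameExcept [⟨g.R - 8, g.R⟩, ⟨g.cb v.mem i + 40, g.cb v.mem i + 48⟩] v.mem w.mem)
    (hun : ShadowUntouched v.mem w.mem) (hcw : Codebook.codewords w.mem (g.cb v.mem i) = 0)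
    (hrip : w.rip = L.start_decoder.cut117) (hrsp : w.reg .rsp = v.reg .rsp) (hcode : CodeOK u₀ w.mem) (hinv : abiInv w)
    (hr14 : w.reg .r14 = v.reg .r14) : AtC9 u₀ g i w := by
  have hfr0 := h.core.frame
  have hcur := h.core.cur
  have hpos : Pos g A := Pos.of hfr0 hcur
  have hm0 : MInv g i A2 A3 Ai A v.mem := MInv.of hfr0 hcur
  obtain ⟨⟨hw1, hw2⟩, hw3, hw4⟩ := hm0.c_where
  have p1 := hpos.r_eq
  have p2 := hpos.ra_lo
  have p3 := hpos.ra_hi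
  have hok : ∀ x, x ∈ [(⟨g.R - 8, g.R⟩ : Span), ⟨g.cb v.mem i + 40, g.cb v.mem i + 48⟩] → OkWin0 g (g.cb v.mem i) x := by
    intro x hx
    simp only [List.mem_cons, List.mem_nil_iff, or_false] at hx
    unfold OkWin0
    rcases hx with rfl | rfl
    · left
      simp only []
      omega
    · right
      right
      right
      left
      simp only []
      omega
  have hb : Bits (g.Blk A) g.len w.mem g.f := by
    apply bits_kept hpos hcur.sd.bits hs
    intro x hx
    simp only [List.mem_cons, List.mem_nil_iff, or_false] at hx
    rcases hx with rfl | rfl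
    · left
      simp only []
      omega
    · right
      left
      simp only []
      omega
  have hfr' : Frame u₀ g pc_C9 A w := Frame.step hfr0 hcur hs hun (fun x hx => (hok x hx).ok) hb hrip hrsp hcode hinv
  obtain ⟨hcur', hcb⟩ := Cur.step hfr0 hcur hs hun (fun x hx => (hok x hx).ok) hb hr14
  have hf : C8fFields v.mem w.mem (g.cb v.mem i) := by
    apply C8fFields.of_eqOn (by omega)
    · apply hs.eqOn
      intro x hx
      simp only [List.mem_cons, List.mem_nil_iff, or_false] at hx
      rcases hx with rfl | rfl
      · simp only []
        omega
      · simp only []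
        omega
    · apply hs.eqOn
      intro x hx
      simp only [List.mem_cons, List.mem_nil_iff, or_false] at hx
      rcases hx with rfl | rfl
      · simp only []
        omega
      · simp only []
        omega
  have hv : 1 ≤ Codebook.sorted_entries v.mem (g.cb v.mem i) →
      (Codebook.svBlock v.mem (g.cb v.mem i)).Kept v.mem w.mem :=
    fun hse => young_kept0 hm0 hpos hs hok (h.core.k4.sv hse)
  refine ⟨A, A2, A3, Ai, ?_⟩
  exact
    { frame := hfr'
      cur := hcur'
      k1 := by rw [hcb]; exact hf.k1 h.core.k1
      k2 := by rw [hcb]; exact hf.k2 h.core.k2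
      k3 := by
        rw [hcb]
        refine ⟨?_, ?_⟩
        · intro h0
          rw [hf.sparse, h.core.sparse1] at h0
          exact absurd h0 (by decide)
        · intro _
          refine ⟨?_, hcw⟩
          rw [hf.codeword_lengths, hf.sorted_entries]
          exact h.core.cl
      k4 := by rw [hcb]; exact hf.k4 h.core.k4 hv
      k4c := by rw [hcb]; exact hf.k4c h.core.k4c hv
      noTemps := h.noTemps
      fresh := by
        rw [hcb]
        exact ⟨by rw [hf.lookup_type]; exact h.core.fresh.lookup_type,
          by rw [hf.lookup_values]; exact h.core.fresh.lookup_values,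
          by rw [hf.multiplicands]; exact h.core.fresh.multiplicands⟩ }

/-! ### 3. The three walks -/

/-- **cut144 → cut145** (0x114b24 – 0x114b4d, line 3866): the checked loads of `c->sorted_entries` and `c->codewords`, and the whole
`call setup_temp_free(f, c->codewords, 4·SE)` releasing the top temp block P2 (`Cur.free_call`). -/
theorem c8f_walk1
    (Lay : Layout) (hLay : Lay.hi = 0x1000000) (μ : Microarch) (hμ : UserX.MicroOK μ) (u₀ : State)
    (hcode : HasCodeNat Lay u₀ Vorbis.L.start_decoder.entry Vorbis.Code.code_start_decoder.nat Vorbis.L.start_decoder.size)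
    (hld4 : Asan.SmallCheck Lay μ Vorbis.WayInv (Vorbis.CodeOK u₀) [.rax, .rcx, .rdx] 4 Vorbis.L.__asan_load4_noabort.entry)
    (hld8 : Asan.SmallCheck Lay μ Vorbis.WayInv (Vorbis.CodeOK u₀) [.rax, .rcx, .rdx] 8 Vorbis.L.__asan_load8_noabort.entry)
    (hfree : ∀ (others : List Obj) (frames : List (Nat × FrameLayout)) (A : Arena) (m : Nat) (rest : List (Nat × Nat)), Calls Lay μ Vorbis.WayInv (Vorbis.conv u₀) Vorbis.L.setup_temp_free.entry (Vorbis.Spec.setup_temp_free.spec others frames A m rest))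
    {g : Ghost} {i : Nat} {A2 A3 Ai : Arena} {A : Arena × List Obj} {lengths : Nat} {v : State}
    (h : In8F u₀ g i A2 A3 Ai A lengths v) :
    ReachVia Lay μ WayInv v (fun w => ∃ A', C8fAt145 u₀ g i A2 A3 Ai A' lengths w) := by
  have he := h.frame.entry
  v_entry he
  have w_rip := h.frame.rip
  have hfr0 := h.frame
  have hcur := h.cur
  have hshad := h.frame.shadow
  have hpos : Pos g A := Pos.of hfr0 hcur
  have p1 := hpos.r_eq
  have p2 := hpos.ra_lo
  have p3 := hpos.ra_hi
  have hsp : (v.reg .rsp).toNat = g.R := by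
    rw [hfr0.rsp]
    exact toNat_addr _ (by omega)
  have c_rbx := h.rbx
  have c_r15 := h.r15
  obtain ⟨hc1, hc2, hc3⟩ := C7.cb_range hcur
  have h14 : (v.reg .r14).toNat = g.cb v.mem i := by
    rw [h.cur.r14]
    exact toNat_addr _ (by omega)
  have c_rbp : v.reg .rbp = v.reg .r14 + 2112 := by
    rw [h.rbp, h.cur.r14]
    exact (Vorbis.addr_add_lit _ 2112).symm
  have w_eq : Mem.EqOn Vorbis.L.textLo Vorbis.L.textHi u₀.mem v.mem := h.frame.code
  have hdf : v.flags .df = false := (show abiInv _ from h.frame.inv).1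
  have hmx : v.mxcsr &&& 0x1F80 = 0x1F80 := (show abiInv _ from h.frame.inv).2
  have hsse := Vorbis.sseOK_of_abiInv h.frame.inv
  have hRA : g.RA = (g.e.reg .rsp).toNat := rfl
  obtain ⟨hf1, hf2, hf3⟩ := c8f_obj_where hcur hshad hfr0.offText
  -- the loads
  have hCWv : v.mem.readLE (v.reg .r14 + 40) 8 = Codebook.codewords v.mem (g.cb v.mem i) := by
    rw [h.cur.r14, Vorbis.addr_add_lit _ 40]
    simp only [vacc, voff, Mem.u64]
  have hnnS := h.k2.se_nonneg
  have hSEv : v.mem.readLE (v.reg .r14 + 2112) 4 = (Codebook.sorted_entries v.mem (g.cb v.mem i)).toNat := by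
    rw [h.cur.r14, Vorbis.addr_add_lit _ 2112]
    have ee : Codebook.sorted_entries v.mem (g.cb v.mem i) = sint32 (v.mem.readLE (addr (g.cb v.mem i + 2112)) 4) := by
      simp only [vacc, voff, Mem.i32, Mem.u32]
    have hc := sint32_cases (v.mem.readLE (addr (g.cb v.mem i + 2112)) 4)
    rw [ee]
    rw [ee] at hnnS
    rcases hc with ⟨_, h2⟩ | ⟨_, h2⟩
    · rw [h2]
      exact (Int.toNat_natCast _).symm
    · have hlt' : v.mem.readLE (addr (g.cb v.mem i + 2112)) 4 < 256 ^ 4 := Mem.readLE_lt' v.mem _ 4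
      rw [h2] at hnnS
      omega
  have hSE24 : (Codebook.sorted_entries v.mem (g.cb v.mem i)).toNat < 2 ^ 24 := by
    have := h.k2.se_le
    have := h.k1.ent_lt
    omega
  have hfr := hfree A.2 g.frames' A.1 (4 * (Codebook.sorted_entries v.mem (g.cb v.mem i)).toNat)
    ([(lengths, (Codebook.entries v.mem (g.cb v.mem i)).toNat)].map (fun b => (b.1 - A.1.B, b.2)))
  u_walk hcode [hμ.vendor] until [Vorbis.L.start_decoder.cut145] span [Vorbis.L.textLo, Vorbis.L.textHi] side (v_side)
  case check_114b27 =>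
    have hun : ShadowUntouched v.mem s_114b27.mem := by v_untouched
    exact Vorbis.Spec.check_site hshad hun (C7.cb_site hcur 2112 4 (by omega) (by omega)) (by u_omega)
  case check_114b3a =>
    have hun : ShadowUntouched v.mem s_114b3a.mem := by v_untouched
    exact Vorbis.Spec.check_site hshad hun (C7.cb_site hcur 40 8 (by omega) (by omega)) (by u_omega)
  case call_inv => v_inv
  case pre_114b4d =>
    have hun : ShadowUntouched v.mem s_114b4d.mem := by v_untouched
    have hcwlt : Codebook.codewords v.mem (g.cb v.mem i) < 2 ^ 64 := by
      rw [← hCWv]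
      exact Mem.readLE_lt' v.mem _ 8
    refine (c8f_free_pre hfr0 hcur h.temps hun ?_ ?_ ?_ ?_ ?_).1
    · rw [w_mem]
      apply Mem.EqOn.writeLE
      · u_omega
      · u_omega
    · rw [w_rsp]
      u_omega
    · rw [w_rdi]
      exact toNat_addr _ (by omega)
    · rw [w_rsi]
      exact toNat_addr _ hcwlt
    · rw [w_rdx, c8f_lea4 _ hSE24]
      omega
  -- 0x114b52 = cut145: setup_temp_free(f, c->codewords, 4·SE) returned
  simp only [X86.User.Spec.footprint, vspec] at w_same
  obtain ⟨hT, hl⟩ := c8f_top hcur h.temps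
  have hcwlt : Codebook.codewords v.mem (g.cb v.mem i) < 2 ^ 64 := by
    rw [← hCWv]
    exact Mem.readLE_lt' v.mem _ 8
  have e_sp : (s_114b4d.reg .rsp).toNat + 8 = g.R := by
    rw [w_rsp_114b4d]
    u_omega
  have e_a : (v.reg .rsp - 8).toNat + 8 = g.R := by u_omega
  have e_rdi : (s_114b4d.reg .rdi).toNat = g.f := by
    rw [w_rdi_114b4d]
    exact toNat_addr _ (by omega)
  have e_rsi : (s_114b4d.reg .rsi).toNat = A.1.B + A.1.T := by
    rw [w_rsi_114b4d, ← hl]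
    exact toNat_addr _ hcwlt
  have e_rdx : (s_114b4d.reg .rdx).toNat % 2 ^ 32 = 4 * (Codebook.sorted_entries v.mem (g.cb v.mem i)).toNat := by
    rw [w_rdx_114b4d, c8f_lea4 _ hSE24]
    omega
  have p4 := hpos.ar_lo
  have hne : s_114b4d.reg .rsi ≠ 0 := by
    intro h0
    rw [h0] at e_rsi
    have : (0 : Word).toNat = 0 := rfl
    omega
  obtain ⟨r1, r2, r3, r4⟩ := Cur.free_call hfr0 hcur w_mem_114b4d e_a e_sp e_rdi hT e_rsi (by rw [e_rdx]) w_same w_post hne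
    w_rip w_rsp (Vorbis.conv_code_eqOn w_code) w_inv (w_kept.get .r14 rfl)
  obtain ⟨hcore, hsf⟩ := c8f_core_free (c8f_core_of_in8F h) r1 r2 r3 r4 (fun B hB => hB)
  apply ReachVia.done
  refine ⟨_, hcore, ?_, ?_, ?_, ?_⟩
  · rw [r3, hsf.entries]
    exact ⟨rfl, fun b hb => h.temps.2 b (List.mem_cons_of_mem _ hb)⟩
  · rw [w_kept.get .r15 rfl]
    exact c_r15
  · rw [w_kept.get .rbx rfl]
    exact c_rbx
  · rw [w_r12, r3, h.cur.r14]

/-- **cut145 → cut146** (0x114b52 – 0x114b65, line 3867): the checked load of `c->entries`, and the whole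
`call setup_temp_free(f, lengths, E)` releasing the last temp block P1 (`Cur.free_call`). -/
theorem c8f_walk2
    (Lay : Layout) (hLay : Lay.hi = 0x1000000) (μ : Microarch) (hμ : UserX.MicroOK μ) (u₀ : State)
    (hcode : HasCodeNat Lay u₀ Vorbis.L.start_decoder.entry Vorbis.Code.code_start_decoder.nat Vorbis.L.start_decoder.size)
    (hld4 : Asan.SmallCheck Lay μ Vorbis.WayInv (Vorbis.CodeOK u₀) [.rax, .rcx, .rdx] 4 Vorbis.L.__asan_load4_noabort.entry)
    (hfree : ∀ (others : List Obj) (frames : List (Nat × FrameLayout)) (A : Arena) (m : Nat) (rest : List (Nat × Nat)), Calls Lay μ Vorbis.WayInv (Vorbis.conv u₀) Vorbis.L.setup_temp_free.entry (Vorbis.Spec.setup_temp_free.spec others frames A m rest))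
    {g : Ghost} {i : Nat} {A2 A3 Ai : Arena} {A : Arena × List Obj} {lengths : Nat} {v : State}
    (h : C8fAt145 u₀ g i A2 A3 Ai A lengths v) :
    ReachVia Lay μ WayInv v (fun w => ∃ A', C8fAt146 u₀ g i A2 A3 Ai A' w) := by
  have hfr0 := h.core.frame
  have hcur := h.core.cur
  have he := hfr0.entry
  v_entry he
  have w_rip := hfr0.rip
  have hshad := hfr0.shadow
  have hpos : Pos g A := Pos.of hfr0 hcur
  have p1 := hpos.r_eq
  have p2 := hpos.ra_lo
  have p3 := hpos.ra_hi
  have hsp : (v.reg .rsp).toNat = g.R := by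
    rw [hfr0.rsp]
    exact toNat_addr _ (by omega)
  have c_rbx := h.rbx
  have c_r15 := h.r15
  obtain ⟨hc1, hc2, hc3⟩ := C7.cb_range hcur
  have h14 : (v.reg .r14).toNat = g.cb v.mem i := by
    rw [hcur.r14]
    exact toNat_addr _ (by omega)
  have c_r12 : v.reg .r12 = v.reg .r14 + 40 := by
    rw [h.r12, hcur.r14]
  have w_eq : Mem.EqOn Vorbis.L.textLo Vorbis.L.textHi u₀.mem v.mem := hfr0.code
  have hdf : v.flags .df = false := (show abiInv _ from hfr0.inv).1
  have hmx : v.mxcsr &&& 0x1F80 = 0x1F80 := (show abiInv _ from hfr0.inv).2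
  have hsse := Vorbis.sseOK_of_abiInv hfr0.inv
  have hRA : g.RA = (g.e.reg .rsp).toNat := rfl
  obtain ⟨hf1, hf2, hf3⟩ := c8f_obj_where hcur hshad hfr0.offText
  -- the load of `c->entries`
  have hEv : v.mem.readLE (v.reg .r14 + 4) 4 = (Codebook.entries v.mem (g.cb v.mem i)).toNat := by
    rw [hcur.r14, Vorbis.addr_add_lit _ 4]
    have ee : Codebook.entries v.mem (g.cb v.mem i) = sint32 (v.mem.readLE (addr (g.cb v.mem i + 4)) 4) := by
      simp only [vacc, voff, Mem.i32, Mem.u32]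
    rw [ee]
    apply c8f_i32_word
    rw [← ee]
    exact h.core.k1.ent_nonneg
  have hE24 : (Codebook.entries v.mem (g.cb v.mem i)).toNat < 2 ^ 24 := by
    have := h.core.k1.ent_lt
    omega
  obtain ⟨hT, hl⟩ := c8f_top hcur h.temps
  have p4 := hpos.ar_lo
  have p5 := hpos.ar_hi
  have hbnd := hcur.sd.arena.bounds
  have hfr := hfree A.2 g.frames' A.1 (Codebook.entries v.mem (g.cb v.mem i)).toNat
    (([] : List (Nat × Nat)).map (fun b => (b.1 - A.1.B, b.2)))
  u_walk hcode [hμ.vendor] until [Vorbis.L.start_decoder.cut146] span [Vorbis.L.textLo, Vorbis.L.textHi] side (v_side)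
  case check_114b56 =>
    have hun : ShadowUntouched v.mem s_114b56.mem := by v_untouched
    exact Vorbis.Spec.check_site hshad hun (C7.cb_site hcur 4 4 (by omega) (by omega)) (by u_omega)
  case call_inv => v_inv
  case pre_114b65 =>
    have hun : ShadowUntouched v.mem s_114b65.mem := by v_untouched
    refine (c8f_free_pre hfr0 hcur h.temps hun ?_ ?_ ?_ ?_ ?_).1
    · rw [w_mem]
      apply Mem.EqOn.writeLE
      · u_omega
      · u_omega
    · rw [w_rsp]
      u_omega
    · rw [w_rdi]
      exact toNat_addr _ (by omega)
    · rw [w_rsi]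
      exact toNat_addr _ (by omega)
    · rw [w_rdx, Vorbis.toNat_ofBV32, BitVec.toNat_ofNat]
      omega
  -- 0x114b6a = cut146: setup_temp_free(f, lengths, E) returned
  simp only [X86.User.Spec.footprint, vspec] at w_same
  have e_sp : (s_114b65.reg .rsp).toNat + 8 = g.R := by
    rw [w_rsp_114b65]
    u_omega
  have e_a : (v.reg .rsp - 8).toNat + 8 = g.R := by u_omega
  have e_rdi : (s_114b65.reg .rdi).toNat = g.f := by
    rw [w_rdi_114b65]
    exact toNat_addr _ (by omega)
  have e_rsi : (s_114b65.reg .rsi).toNat = A.1.B + A.1.T := by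
    rw [w_rsi_114b65, ← hl]
    exact toNat_addr _ (by omega)
  have e_rdx : (s_114b65.reg .rdx).toNat % 2 ^ 32 = (Codebook.entries v.mem (g.cb v.mem i)).toNat := by
    rw [w_rdx_114b65, Vorbis.toNat_ofBV32, BitVec.toNat_ofNat]
    omega
  have hne : s_114b65.reg .rsi ≠ 0 := by
    intro h0
    rw [h0] at e_rsi
    have : (0 : Word).toNat = 0 := rfl
    omega
  obtain ⟨r1, r2, r3, r4⟩ := Cur.free_call hfr0 hcur w_mem_114b65 e_a e_sp e_rdi hT e_rsi (by rw [e_rdx]) w_same w_post hne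
    w_rip w_rsp (Vorbis.conv_code_eqOn w_code) w_inv (w_kept.get .r14 rfl)
  obtain ⟨hcore, hsf⟩ := c8f_core_free h.core r1 r2 r3 r4 (fun B hB => hB)
  apply ReachVia.done
  refine ⟨_, hcore, rfl, ?_⟩
  rw [w_kept.get .r12 rfl, r3, c_r12, hcur.r14]

/-- **cut146 → `AtC9`** (0x114b6a – 0x114b7a, line 3868): the checked store `c->codewords = NULL` and the `jmp` to cut117. -/
theorem c8f_walk3
    (Lay : Layout) (hLay : Lay.hi = 0x1000000) (μ : Microarch) (hμ : UserX.MicroOK μ) (u₀ : State)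
    (hcode : HasCodeNat Lay u₀ Vorbis.L.start_decoder.entry Vorbis.Code.code_start_decoder.nat Vorbis.L.start_decoder.size)
    (hst8 : Asan.SmallCheck Lay μ Vorbis.WayInv (Vorbis.CodeOK u₀) [.rax, .rcx, .rdx] 8 Vorbis.L.__asan_store8_noabort.entry)
    {g : Ghost} {i : Nat} {A2 A3 Ai : Arena} {A : Arena × List Obj} {v : State}
    (h : C8fAt146 u₀ g i A2 A3 Ai A v) :
    ReachVia Lay μ WayInv v (fun w => AtC9 u₀ g i w) := by
  have hfr0 := h.core.frame
  have hcur := h.core.cur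
  have he := hfr0.entry
  v_entry he
  have w_rip := hfr0.rip
  have hshad := hfr0.shadow
  have hpos : Pos g A := Pos.of hfr0 hcur
  have p1 := hpos.r_eq
  have p2 := hpos.ra_lo
  have p3 := hpos.ra_hi
  have hsp : (v.reg .rsp).toNat = g.R := by
    rw [hfr0.rsp]
    exact toNat_addr _ (by omega)
  obtain ⟨hc1, hc2, hc3⟩ := C7.cb_range hcur
  have h14 : (v.reg .r14).toNat = g.cb v.mem i := by
    rw [hcur.r14]
    exact toNat_addr _ (by omega)
  have c_r12 : v.reg .r12 = v.reg .r14 + 40 := by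
    rw [h.r12, hcur.r14]
  have w_eq : Mem.EqOn Vorbis.L.textLo Vorbis.L.textHi u₀.mem v.mem := hfr0.code
  have hdf : v.flags .df = false := (show abiInv _ from hfr0.inv).1
  have hmx : v.mxcsr &&& 0x1F80 = 0x1F80 := (show abiInv _ from hfr0.inv).2
  have hsse := Vorbis.sseOK_of_abiInv hfr0.inv
  have hRA : g.RA = (g.e.reg .rsp).toNat := rfl
  have hm0 : MInv g i A2 A3 Ai A v.mem := MInv.of hfr0 hcur
  obtain ⟨⟨hw1, hw2⟩, hw3, hw4⟩ := hm0.c_where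
  have hat : 0x119d40 ≤ A.1.B := hcur.hand.arenaText
  u_walk hcode [hμ.vendor] until [Vorbis.L.start_decoder.cut117] span [Vorbis.L.textLo, Vorbis.L.textHi] side (v_side)
  case check_114b6d =>
    have hun : ShadowUntouched v.mem s_114b6d.mem := by v_untouched
    exact Vorbis.Spec.check_site hshad hun (C7.cb_site hcur 40 8 (by omega) (by omega)) (by u_omega)
  -- 0x114724 = cut117: `c->codewords = NULL` stored
  have hs : Mem.SameExcept [⟨g.R - 8, g.R⟩, ⟨g.cb v.mem i + 40, g.cb v.mem i + 48⟩] v.mem s_114b7a.mem := by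
    rw [w_mem]
    apply Mem.SameExcept.step_writeLE
    · apply Mem.SameExcept.writeLE
      · u_omega
      · refine ⟨_, List.mem_cons_self, ?_, ?_⟩
        · simp only []
          u_omega
        · simp only []
          u_omega
    · u_omega
    · refine ⟨_, List.mem_cons_of_mem _ List.mem_cons_self, ?_, ?_⟩
      · simp only []
        u_omega
      · simp only []
        u_omega
  have hun : ShadowUntouched v.mem s_114b7a.mem := by v_untouched
  have hcw : Codebook.codewords s_114b7a.mem (g.cb v.mem i) = 0 := by
    rw [w_mem]
    simp only [vacc, voff, Mem.u64]
    rw [← Vorbis.addr_add_lit _ 40, ← hcur.r14]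
    exact (Mem.readLE_writeLE_same _ _ 8 0 (by decide)).trans (Nat.zero_mod _)
  have hinv' : abiInv s_114b7a := by
    refine Vorbis.abiInv_of ?_ ?_
    · rw [w_flags]
      exact w_df_114b6d
    · rw [w_mxcsr]
      exact hmx
  apply ReachVia.done
  exact c8f_store_exit h hs hun hcw w_rip w_rsp w_eq hinv' (w_kept.get .r14 rfl)

end Vorbis.Spec.start_decoder_C8f
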